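-- pv_equiv track=rewrite | github.com/KaiserTom/Advent2019 | day1/day1.py | get_fuelcostoffuel
-- ===== SOURCE A (Python) =====
-- def get_fuelcostoffuel(fuelcost):
--     for location, fuel in enumerate(fuelcost):
--         fuelfuelcost = (fuel // 3) - 2
--         while fuelfuelcost >= 0:
--             fuel = fuel + fuelfuelcost
--             fuelfuelcost = (fuelfuelcost // 3) - 2
--         fuelcost[location] = fuel
--
--     return fuelcost
-- ===== SOURCE B (Python) =====
-- def extra(f):
--     c = f // 3 - 2
--     return 0 if c < 0 else c + extra(c)
--
-- def get_fuelcostoffuel(fuelcost):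
--     for location, fuel in enumerate(fuelcost):
--         fuelcost[location] = fuel + extra(fuel)
--     return fuelcost
-- ===== Notes on version B (the rewrite author's own statement) =====
-- stated objective: simpler
-- what changed: The inner while loop that accumulates the iterated fuel series is replaced by a recursive helper extra(f) returning the total extra fuel for f, so the per-module update becomes a single expression.
import Mathlib
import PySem

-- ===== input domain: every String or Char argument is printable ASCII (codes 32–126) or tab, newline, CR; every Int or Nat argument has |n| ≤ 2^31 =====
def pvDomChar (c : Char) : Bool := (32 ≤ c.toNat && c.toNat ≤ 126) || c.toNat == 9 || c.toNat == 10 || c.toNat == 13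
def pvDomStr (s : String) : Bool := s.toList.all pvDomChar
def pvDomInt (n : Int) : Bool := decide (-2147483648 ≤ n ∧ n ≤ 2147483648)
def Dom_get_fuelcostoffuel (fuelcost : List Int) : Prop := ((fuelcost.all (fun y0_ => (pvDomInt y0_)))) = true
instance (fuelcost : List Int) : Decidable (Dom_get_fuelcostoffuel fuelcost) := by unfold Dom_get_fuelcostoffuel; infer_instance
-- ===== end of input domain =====

-- B replaces A's inner while loop by a recursive helper computing the iterated extra-fuel sum (simpler decomposition);
-- A mutates its argument list in place and returns it — the equivalence proved here is about the RETURN value only.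

-- ===== PORT A =====
-- termination fact for A's while loop, cited by the port
theorem pvA_dec (c : Int) (h : 0 ≤ c) :
    (PySem.Int.floordiv c 3 - 2 + 1).toNat < (c + 1).toNat := by
  have h1 : PySem.Int.floordiv c 3 ≤ c := by
    rw [PySem.Int.floordiv_eq_ediv_of_pos (by omega)]
    exact Int.ediv_le_self 3 h
  omega

-- the while loop: state (fuel, fuelfuelcost)
def aloop (fuel c : Int) : Int :=
  if h : c ≥ 0 then
    aloop (fuel + c) (PySem.Int.floordiv c 3 - 2)
  else fuel
termination_by (c + 1).toNat
decreasing_by exact pvA_dec c h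

def get_fuelcostoffuel (fuelcost : List Int) : List Int :=
  fuelcost.map (fun fuel => aloop fuel (PySem.Int.floordiv fuel 3 - 2))

-- ===== PORT B =====
theorem pvB_dec (f : Int) (h : ¬ PySem.Int.floordiv f 3 - 2 < 0) :
    (PySem.Int.floordiv f 3 - 2 + 1).toNat < (f + 1).toNat := by
  have h2 : 2 ≤ PySem.Int.floordiv f 3 := by omega
  have hf : 6 ≤ f := by
    have := (PySem.Int.le_floordiv_iff_mul_le (a := f) (b := 3) (q := 2) (by omega)).mp (by omega)
    omega
  have h1 : PySem.Int.floordiv f 3 ≤ f := by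
    rw [PySem.Int.floordiv_eq_ediv_of_pos (by omega)]
    exact Int.ediv_le_self 3 (by omega)
  omega

def extra (f : Int) : Int :=
  -- c = f // 3 - 2, written out inline
  if h : PySem.Int.floordiv f 3 - 2 < 0 then 0
  else (PySem.Int.floordiv f 3 - 2) + extra (PySem.Int.floordiv f 3 - 2)
termination_by (f + 1).toNat
decreasing_by exact pvB_dec f h

def get_fuelcostoffuel_alt (fuelcost : List Int) : List Int :=
  fuelcost.map (fun fuel => fuel + extra fuel)

-- ===== PRECONDITION & SPEC =====
def Spec_get_fuelcostoffuel (fuelcost : List Int) (out : List Int) : Prop := out = get_fuelcostoffuel_alt fuelcost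
instance (fuelcost : List Int) (out : List Int) : Decidable (Spec_get_fuelcostoffuel fuelcost out) := by unfold Spec_get_fuelcostoffuel; infer_instance

-- ===== CLAIM (what is proved, stated in full; the proofs are below) =====
def Claim_equal_get_fuelcostoffuel : Prop := ∀ (fuelcost : List Int), Dom_get_fuelcostoffuel fuelcost → Spec_get_fuelcostoffuel fuelcost (get_fuelcostoffuel fuelcost)

-- ===== LEMMAS AND PROOFS =====

-- the loop starting at state (fuel, c) adds exactly "if c < 0 then 0 else c + extra c" to fuel
theorem aloop_eq (n : ℕ) : ∀ c fuel : Int, (c + 1).toNat ≤ n →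
    aloop fuel c = fuel + (if c < 0 then 0 else c + extra c) := by
  induction n with
  | zero =>
    intro c fuel hn
    rw [aloop, dif_neg (by omega : ¬ c ≥ 0), if_pos (by omega : c < 0), add_zero]
  | succ n ih =>
    intro c fuel hn
    rw [aloop]
    by_cases hc : c ≥ 0
    · have hdec := pvA_dec c hc
      rw [dif_pos hc, ih _ _ (by omega), if_neg (by omega : ¬ c < 0)]
      conv_rhs => rw [extra]
      split_ifs <;> ring
    · rw [dif_neg hc, if_pos (by omega : c < 0), add_zero]

theorem per_element (fuel : Int) :
    aloop fuel (PySem.Int.floordiv fuel 3 - 2) = fuel + extra fuel := by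
  rw [aloop_eq (PySem.Int.floordiv fuel 3 - 2 + 1).toNat _ _ le_rfl]
  conv_rhs => rw [extra]
  split_ifs with h
  · rfl
  · rfl

-- ===== VERDICT (by name: the statement is the Claim_ definition above) =====
theorem get_fuelcostoffuel_spec : Claim_equal_get_fuelcostoffuel := by
  intro fuelcost _
  unfold Spec_get_fuelcostoffuel get_fuelcostoffuel get_fuelcostoffuel_alt
  exact List.map_congr_left (fun fuel _ => per_element fuel)
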